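-- pv_equiv track=rewrite | github.com/NicksBytesOfFun/algorithms | BTreeDir/backup.py | get_all_duplicates
-- ===== SOURCE A (Python) =====
-- def get_all_duplicates(lst):
--     dupe_list = []
--     instance_list = []
--     for i in range(len(lst)):
--         for j in range(i + 1, len(lst)):
--             if lst[i] == lst[j]:
--                 dupe_list.append(lst[i])
--                 instance_list.append(i)
--
--     return dupe_list, instance_list
-- ===== SOURCE B (Python) =====
-- def get_all_duplicates(lst):
--     counts = {}
--     ks = []
--     for x in reversed(lst):
--         k = counts.get(x, 0)
--         ks.append(k)
--         counts[x] = k + 1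
--     ks.reverse()
--     dupe_list = []
--     instance_list = []
--     for i, (x, k) in enumerate(zip(lst, ks)):
--         dupe_list.extend([x] * k)
--         instance_list.extend([i] * k)
--     return dupe_list, instance_list
-- ===== Notes on version B (the rewrite author's own statement) =====
-- stated objective: alternative
-- what changed: Replaces A's nested pairwise-comparison loops with a single right-to-left dict pass counting later occurrences per index, followed by one emit pass of replicated values/indices.
import Mathlib
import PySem

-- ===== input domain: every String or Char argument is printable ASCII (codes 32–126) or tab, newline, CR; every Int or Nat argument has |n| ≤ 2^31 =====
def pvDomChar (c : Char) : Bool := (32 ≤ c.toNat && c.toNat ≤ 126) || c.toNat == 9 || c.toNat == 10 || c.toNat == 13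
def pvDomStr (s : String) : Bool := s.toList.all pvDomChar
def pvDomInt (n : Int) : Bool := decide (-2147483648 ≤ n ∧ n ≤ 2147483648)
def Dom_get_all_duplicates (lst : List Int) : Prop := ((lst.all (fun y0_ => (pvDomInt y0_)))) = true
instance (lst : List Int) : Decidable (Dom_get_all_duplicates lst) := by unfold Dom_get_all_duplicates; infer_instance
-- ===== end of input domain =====

-- B replaces A's nested pairwise scan by one right-to-left dict counting pass plus one
-- emit pass (objective: alternative; the output itself can be quadratic in size, so the
-- comparison work saved does not dominate).

-- ===== PORT A =====
def get_all_duplicates (lst : List Int) : List Int × List Int :=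
  (PySem.List.pyRange 0 (PySem.List.len lst) 1).foldl
    (fun st i =>
      (PySem.List.pyRange (i + 1) (PySem.List.len lst) 1).foldl
        (fun st j =>
          if PySem.List.pyGetD lst i 0 = PySem.List.pyGetD lst j 0 then
            (st.1 ++ [PySem.List.pyGetD lst i 0], st.2 ++ [i])
          else st) st)
    ([], [])

-- ===== PORT B =====
def get_all_duplicates_alt (lst : List Int) : List Int × List Int :=
  let p := lst.reverse.foldl
    (fun (st : PySem.Dict Int Int × List Int) x =>
      let k := st.1.getD x 0
      (st.1.insert x (k + 1), st.2 ++ [k]))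
    (PySem.Dict.empty, [])
  let ks := p.2.reverse
  (PySem.List.enumerate (lst.zip ks) 0).foldl
    (fun st e =>
      (st.1 ++ List.replicate e.2.2.toNat e.2.1, st.2 ++ List.replicate e.2.2.toNat e.1))
    ([], [])

-- ===== PRECONDITION & SPEC =====
def Spec_get_all_duplicates (lst : List Int) (out : List Int × List Int) : Prop := out = get_all_duplicates_alt lst
instance (lst : List Int) (out : List Int × List Int) : Decidable (Spec_get_all_duplicates lst out) := by unfold Spec_get_all_duplicates; infer_instance

-- ===== CLAIM (what is proved, stated in full; the proofs are below) =====
def Claim_equal_get_all_duplicates : Prop := ∀ (lst : List Int), Dom_get_all_duplicates lst → Spec_get_all_duplicates lst (get_all_duplicates lst)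

-- ===== LEMMAS AND PROOFS =====

/-- The values list both programs produce: per element, one copy per later occurrence. -/
def bigD : List Int → List Int
  | [] => []
  | x :: xs => List.replicate (xs.count x) x ++ bigD xs

/-- The index list both programs produce (s = index of the head). -/
def bigI (s : Int) : List Int → List Int
  | [] => []
  | x :: xs => List.replicate (xs.count x) s ++ bigI (s + 1) xs

/-- ks produced by B's first pass when the prefix p has already been processed. -/
def specKs : List Int → List Int → List Int
  | _, [] => []
  | p, z :: zs => ((p.count z : Nat) : Int) :: specKs (p ++ [z]) zs

lemma foldl_pair_append {γ : Type} (step : List Int × List Int → γ → List Int × List Int)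
    (f g : γ → List Int) (h : ∀ st w, step st w = (st.1 ++ f w, st.2 ++ g w)) :
    ∀ (ws : List γ) (st : List Int × List Int),
      ws.foldl step st = (st.1 ++ ws.flatMap f, st.2 ++ ws.flatMap g) := by
  intro ws
  induction ws with
  | nil => intro st; simp
  | cons w ws ih => intro st; simp [List.foldl_cons, h, ih]

lemma foldl_if_append (x i : Int) :
    ∀ (ys : List Int) (st : List Int × List Int),
      ys.foldl (fun st y => if x = y then (st.1 ++ [x], st.2 ++ [i]) else st) st
        = (st.1 ++ List.replicate (ys.count x) x, st.2 ++ List.replicate (ys.count x) i) := by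
  intro ys
  induction ys with
  | nil => intro st; simp
  | cons y ys ih =>
    intro st
    by_cases hxy : x = y
    · subst hxy
      simp [List.foldl_cons, ih, List.append_assoc]
      constructor <;> rw [← List.replicate_succ, List.replicate_succ']
    · simp [List.foldl_cons, ih, Ne.symm hxy, hxy]

lemma counter_insert (p : List Int) (x : Int) :
    (PySem.Dict.counter p).insert x ((PySem.Dict.counter p).getD x 0 + 1)
      = PySem.Dict.counter (p ++ [x]) := by
  have h := PySem.Dict.foldl_insert_getD_add_one_eq_counter (p ++ [x])
  rw [List.foldl_append] at h
  rw [PySem.Dict.foldl_insert_getD_add_one_eq_counter] at h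
  simpa using h

lemma pass_eq :
    ∀ (zs p ks0 : List Int),
      zs.foldl (fun (st : PySem.Dict Int Int × List Int) x =>
          let k := st.1.getD x 0
          (st.1.insert x (k + 1), st.2 ++ [k])) (PySem.Dict.counter p, ks0)
        = (PySem.Dict.counter (p ++ zs), ks0 ++ specKs p zs) := by
  intro zs
  induction zs with
  | nil => intro p ks0; simp [specKs]
  | cons z zs ih =>
    intro p ks0
    rw [List.foldl_cons]
    show zs.foldl _ ((PySem.Dict.counter p).insert z ((PySem.Dict.counter p).getD z 0 + 1),
        ks0 ++ [(PySem.Dict.counter p).getD z 0]) = _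
    rw [counter_insert, PySem.Dict.getD_counter, ih]
    simp [specKs]

lemma specKs_append :
    ∀ (zs p : List Int) (z : Int),
      specKs p (zs ++ [z]) = specKs p zs ++ [(((p ++ zs).count z : Nat) : Int)] := by
  intro zs
  induction zs with
  | nil => intro p z; simp [specKs]
  | cons w zs ih =>
    intro p z
    simp only [List.cons_append, specKs, ih, List.append_assoc]
    simp

lemma mapKs :
    ∀ (l : List Int),
      (specKs [] l.reverse).reverse
        = List.mapIdx (fun t y => (((l.drop (t + 1)).count y : Nat) : Int)) l := by
  intro l
  induction l with
  | nil => simp [specKs]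
  | cons x xs ih =>
    rw [List.reverse_cons, specKs_append]
    simp [List.count_reverse, ih, List.mapIdx_cons]

lemma enum_zip :
    ∀ (l : List Int) (s : Int) (st : List Int × List Int),
      (PySem.List.enumerate (l.zip (List.mapIdx (fun t y => (((l.drop (t + 1)).count y : Nat) : Int)) l)) s).foldl
          (fun st e =>
            (st.1 ++ List.replicate e.2.2.toNat e.2.1, st.2 ++ List.replicate e.2.2.toNat e.1)) st
        = (st.1 ++ bigD l, st.2 ++ bigI s l) := by
  intro l
  induction l with
  | nil => intro s st; simp [bigD, bigI]
  | cons x xs ih =>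
    intro s st
    simp only [List.mapIdx_cons, List.zip_cons_cons, PySem.List.enumerate_cons, List.foldl_cons,
      List.drop_succ_cons]
    rw [ih]
    simp [bigD, bigI, List.append_assoc]

lemma A_step (lst : List Int) (k : Nat) (st : List Int × List Int) :
    (PySem.List.pyRange ((k : Int) + 1) ((lst.length : Int)) 1).foldl
        (fun st j =>
          if PySem.List.pyGetD lst (k : Int) 0 = PySem.List.pyGetD lst j 0 then
            (st.1 ++ [PySem.List.pyGetD lst (k : Int) 0], st.2 ++ [(k : Int)])
          else st) st
      = (st.1 ++ List.replicate ((lst.drop (k + 1)).count (lst.getD k 0)) (lst.getD k 0),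
         st.2 ++ List.replicate ((lst.drop (k + 1)).count (lst.getD k 0)) ((k : Int))) := by
  have h := PySem.List.foldl_pyRange_pyGetD' lst 0
    (fun st y => if lst.getD k 0 = y then (st.1 ++ [lst.getD k 0], st.2 ++ [(k : Int)]) else st) st
    (a := (k : Int) + 1) (by positivity)
  simp only [PySem.List.pyGetD_natCast] at h ⊢
  rw [h]
  have ht : ((k : Int) + 1).toNat = k + 1 := by omega
  rw [ht, foldl_if_append]

lemma flat_bigD :
    ∀ (l : List Int),
      (List.range l.length).flatMap
          (fun k => List.replicate ((l.drop (k + 1)).count (l.getD k 0)) (l.getD k 0)) = bigD l := by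
  intro l
  induction l with
  | nil => simp [bigD]
  | cons x xs ih =>
    simp only [List.length_cons, List.range_succ_eq_map, List.flatMap_cons, List.flatMap_map,
      Nat.succ_eq_add_one, List.drop_succ_cons, List.getD_cons_succ]
    simp only [List.getD_eq_getElem?_getD] at ih
    simp [bigD, ih]

lemma flat_bigI :
    ∀ (l : List Int) (s : Int),
      (List.range l.length).flatMap
          (fun k => List.replicate ((l.drop (k + 1)).count (l.getD k 0)) (s + (k : Int))) = bigI s l := by
  intro l
  induction l with
  | nil => intro s; simp [bigI]
  | cons x xs ih =>
    intro s
    simp only [List.length_cons, List.range_succ_eq_map, List.flatMap_cons, List.flatMap_map,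
      Nat.succ_eq_add_one, List.drop_succ_cons, List.getD_cons_succ]
    have h : (fun k : Nat =>
        List.replicate ((xs.drop (k + 1)).count (xs.getD k 0)) (s + ((k : Nat) + 1 : Int)))
        = fun k : Nat =>
        List.replicate ((xs.drop (k + 1)).count (xs.getD k 0)) ((s + 1) + (k : Int)) := by
      funext k; congr 1; ring
    push_cast [h]
    simp only [List.getD_eq_getElem?_getD] at ih
    simp [bigI, ih]

lemma hA (lst : List Int) :
    get_all_duplicates lst = (bigD lst, bigI 0 lst) := by
  unfold get_all_duplicates
  have hlen : PySem.List.len lst = ((lst.length : Nat) : Int) := by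
    simp [PySem.List.len_eq]
  rw [hlen, PySem.List.pyRange_zero_nat, List.foldl_map]
  rw [foldl_pair_append _
    (fun k : Nat => List.replicate ((lst.drop (k + 1)).count (lst.getD k 0)) (lst.getD k 0))
    (fun k : Nat => List.replicate ((lst.drop (k + 1)).count (lst.getD k 0)) ((k : Int)))
    (fun st k => A_step lst k st)]
  have hI : (List.range lst.length).flatMap
      (fun k => List.replicate ((lst.drop (k + 1)).count (lst.getD k 0)) ((k : Int))) = bigI 0 lst := by
    have := flat_bigI lst 0
    simpa using this
  have hD := flat_bigD lst
  simp only [List.getD_eq_getElem?_getD] at hD hI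
  simp [hD, hI]

lemma hB (lst : List Int) :
    get_all_duplicates_alt lst = (bigD lst, bigI 0 lst) := by
  unfold get_all_duplicates_alt
  rw [show (PySem.Dict.empty : PySem.Dict Int Int) = PySem.Dict.counter [] from rfl]
  rw [pass_eq]
  simp only [List.nil_append]
  rw [mapKs, enum_zip]
  simp

theorem get_all_duplicates_spec : Claim_equal_get_all_duplicates := by
  intro lst _
  unfold Spec_get_all_duplicates
  rw [hA, hB]
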